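-- pv_equiv track=rewrite | github.com/sloproo/advent_of_code_2024 | 11/02.py | kierros
-- ===== SOURCE A (Python) =====
-- def parill_pituudesta(kivi: int) -> list:
--     kivi = str(kivi)
--     assert len(kivi) % 2 == 0
--     eka = kivi[:len(kivi) // 2]
--     toka = kivi[len(kivi) // 2:]
--     return [int(eka), int(toka)]
--
-- def jamasta(kivi:int) -> int:
--     return kivi * 2024
--
-- def kierros(kivet: dict) -> dict:
--     seuraava = {}
--     for kivi in kivet:
--         if kivi == 0:
--             seuraava[1] = kivet[0]
--         elif len(str(kivi)) % 2 == 0: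
--             for puolikas in parill_pituudesta(kivi):
--                 if puolikas in seuraava:
--                     seuraava[puolikas] += kivet[kivi]
--                 else:
--                     seuraava[puolikas] = kivet[kivi]
--         else:
--             if jamasta(kivi) in seuraava:
--                 seuraava[jamasta(kivi)] += kivet[kivi]
--             else:
--                 seuraava[jamasta(kivi)] = kivet[kivi]
--
--     return seuraava
-- ===== SOURCE B (Python) =====
-- def successors(kivi):
--     if kivi == 0:
--         return [1]
--     s = str(kivi)
--     if len(s) % 2 == 0:
--         return [int(s[:len(s) // 2]), int(s[len(s) // 2:])]
--     return [kivi * 2024]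
--
-- def kierros(kivet):
--     # staged: materialise the full contribution list, then dedup keys in
--     # first-occurrence order, then compute each count by a per-key scan
--     pairs = [(s, n) for kivi, n in kivet.items() for s in successors(kivi)]
--     order = []
--     for s, _ in pairs:
--         if s not in order:
--             order.append(s)
--     return {s: sum(n for t, n in pairs if t == s) for s in order}
-- ===== Notes on version B (the rewrite author's own statement) =====
-- stated objective: alternative
-- what changed: B abandons A's single-pass dict accumulation with three inline branch shapes: it materialises the flat list of (stone, count) contributions, dedups the stones in first-occurrence order, and builds the result by summing each stone's contributions in a per-key scan of that list.
-- intended difference: On dicts where key 0 occurs after keys whose splits send a nonzero total count onto stone 1 (e.g. keys 10..19, 1001, -101 before the 0), A's zero branch plain-assigns stone 1's entry to the count of stone 0, discarding that total, while B adds it; adding is the intended stone-counting behaviour. — e.g. on kierros([(10, 1), (0, 1)]): A returns [(1, 1), (0, 1)], B returns [(1, 2), (0, 1)]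
import Mathlib
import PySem

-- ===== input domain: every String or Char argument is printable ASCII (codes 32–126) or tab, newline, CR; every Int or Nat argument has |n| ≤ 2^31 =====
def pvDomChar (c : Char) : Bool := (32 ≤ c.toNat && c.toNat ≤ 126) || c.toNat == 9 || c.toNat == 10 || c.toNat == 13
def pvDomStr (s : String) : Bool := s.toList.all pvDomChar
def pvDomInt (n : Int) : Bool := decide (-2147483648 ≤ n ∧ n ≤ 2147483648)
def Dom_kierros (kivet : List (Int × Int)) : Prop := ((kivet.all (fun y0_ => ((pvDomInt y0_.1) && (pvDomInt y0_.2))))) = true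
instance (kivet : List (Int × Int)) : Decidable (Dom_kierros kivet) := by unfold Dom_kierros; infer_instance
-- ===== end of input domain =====

-- B replaces A's single-pass dict accumulation by staged passes: flatten all (stone, count)
-- contributions, dedup stones in first-occurrence order, sum each stone's contributions by a
-- per-key scan (objective: alternative); return value only, no mutation involved.

-- ===== PORT A =====
-- str(kivi) is PySem.Int.toChars; slices s[:n], s[n:] with 0 ≤ n are exactly take/drop
-- (PySem.List.slice_natCast); int(half) is PySem.Int.ofChars?, total via .getD 0 because
-- Pre_ excludes the keys -9..-1 on which Python's int() raises ValueError.
def parill_pituudesta (kivi : Int) : List Int :=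
  let s := PySem.Int.toChars kivi
  let eka := s.take (s.length / 2)
  let toka := s.drop (s.length / 2)
  [(PySem.Int.ofChars? eka).getD 0, (PySem.Int.ofChars? toka).getD 0]

def jamasta (kivi : Int) : Int := kivi * 2024

-- `for kivi in kivet` iterates the dict's keys in insertion order; `kivet[kivi]` is the
-- dict lookup, ported as (Dict.mk kivet).getD kivi 0 (the key is present, so total).
def kierros (kivet : List (Int × Int)) : List (Int × Int) :=
  let d := PySem.Dict.mk kivet
  (kivet.foldl (fun seuraava p =>
      if p.1 = 0 then
        seuraava.insert 1 (d.getD 0 0)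
      else if (PySem.Int.toChars p.1).length % 2 = 0 then
        (parill_pituudesta p.1).foldl (fun s puolikas =>
            if s.contains puolikas then
              s.insert puolikas (s.getD puolikas 0 + d.getD p.1 0)
            else
              s.insert puolikas (d.getD p.1 0)) seuraava
      else
        if seuraava.contains (jamasta p.1) then
          seuraava.insert (jamasta p.1) (seuraava.getD (jamasta p.1) 0 + d.getD p.1 0)
        else
          seuraava.insert (jamasta p.1) (d.getD p.1 0)) PySem.Dict.empty).items

-- ===== PORT B =====
def successors (kivi : Int) : List Int :=
  if kivi = 0 then [1]
  else
    let s := PySem.Int.toChars kivi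
    if s.length % 2 = 0 then
      [(PySem.Int.ofChars? (s.take (s.length / 2))).getD 0,
       (PySem.Int.ofChars? (s.drop (s.length / 2))).getD 0]
    else [kivi * 2024]

-- pairs is the list comprehension (flatMap); the `order` loop is foldl of Set.add; the final
-- dict comprehension has distinct keys, so the dict's items are exactly the mapped list.
def kierros_alt (kivet : List (Int × Int)) : List (Int × Int) :=
  let pairs := kivet.flatMap (fun p => (successors p.1).map (fun s => (s, p.2)))
  let order := pairs.foldl (fun o q => PySem.Set.add o q.1) PySem.Set.empty
  order.map (fun s => (s, ((pairs.filter (fun q => q.1 == s)).map (·.2)).sum))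

-- ===== PRECONDITION & SPEC =====
-- Pre_ excludes (a) duplicate keys, impossible in the Python dict argument, and
-- (b) keys -9..-1, on which A (and B) raise ValueError: int('-') inside the split branch.
def Pre_kierros (kivet : List (Int × Int)) : Prop :=
  (kivet.map Prod.fst).Nodup ∧ ∀ p ∈ kivet, ¬(-9 ≤ p.1 ∧ p.1 ≤ -1)
instance (kivet : List (Int × Int)) : Decidable (Pre_kierros kivet) := by
  unfold Pre_kierros; infer_instance

def pvWitness_kierros : (List (Int × Int)) := [(10, 2), (0, 3), (99, 1)]

-- Per-entry count sent onto stone 1 by the split branch: how many of the two decimal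
-- halves of the key read as integer 1 (keys 10..19, 21, 1001, -101, …), times the entry's count.
def ones (p : Int × Int) : Int :=
  let s := PySem.Int.toChars p.1
  if s.length % 2 == 0 then ((parill_pituudesta p.1).count 1 : Int) * p.2 else 0

-- On dicts where key 0 occurs after keys whose splits send a nonzero total count onto stone 1,
-- A's zero branch plain-assigns stone 1's entry to the count of stone 0, discarding that total,
-- while B adds it; adding is the intended stone-counting behaviour.
def D_kierros (kivet : List (Int × Int)) : Prop :=
  0 ∈ kivet.map Prod.fst ∧ ((kivet.takeWhile (·.1 != 0)).map ones).sum ≠ 0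
instance (kivet : List (Int × Int)) : Decidable (D_kierros kivet) := by
  unfold D_kierros; infer_instance

def Spec_kierros (kivet : List (Int × Int)) (out : List (Int × Int)) : Prop :=
  ¬ D_kierros kivet → out = kierros_alt kivet
instance (kivet : List (Int × Int)) (out : List (Int × Int)) : Decidable (Spec_kierros kivet out) := by
  unfold Spec_kierros; infer_instance

def pvDiffWitness_kierros : (List (Int × Int)) := [(10, 1), (0, 1)]
def pvDiffWitnessOut_kierros : (List (Int × Int)) × (List (Int × Int)) :=
  ([(1, 1), (0, 1)], [(1, 2), (0, 1)])

-- ===== CLAIM (what is proved, stated in full; the proofs are below) =====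
def Claim_unchanged_kierros : Prop :=
  ∀ (kivet : List (Int × Int)), Dom_kierros kivet → Pre_kierros kivet →
    Spec_kierros kivet (kierros kivet)
def Claim_changed_kierros : Prop :=
  Dom_kierros (pvDiffWitness_kierros) ∧ Pre_kierros (pvDiffWitness_kierros) ∧
  D_kierros (pvDiffWitness_kierros) ∧
  kierros (pvDiffWitness_kierros) = pvDiffWitnessOut_kierros.1 ∧
  kierros_alt (pvDiffWitness_kierros) = pvDiffWitnessOut_kierros.2 ∧
  pvDiffWitnessOut_kierros.1 ≠ pvDiffWitnessOut_kierros.2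
def Claim_exact_kierros : Prop :=
  ∀ (kivet : List (Int × Int)), Dom_kierros kivet → Pre_kierros kivet → D_kierros kivet →
    kierros kivet ≠ kierros_alt kivet

-- ===== LEMMAS AND PROOFS =====

def stepA (d : PySem.Dict Int Int) (seuraava : PySem.Dict Int Int) (p : Int × Int) : PySem.Dict Int Int :=
  if p.1 = 0 then
    seuraava.insert 1 (d.getD 0 0)
  else if (PySem.Int.toChars p.1).length % 2 = 0 then
    (parill_pituudesta p.1).foldl (fun s puolikas =>
        if s.contains puolikas then
          s.insert puolikas (s.getD puolikas 0 + d.getD p.1 0)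
        else
          s.insert puolikas (d.getD p.1 0)) seuraava
  else
    if seuraava.contains (jamasta p.1) then
      seuraava.insert (jamasta p.1) (seuraava.getD (jamasta p.1) 0 + d.getD p.1 0)
    else
      seuraava.insert (jamasta p.1) (d.getD p.1 0)

-- A's uniform get-add accumulation step over the successor stones; the proof's midpoint:
-- A's fold equals this fold outside D_, and B's staged computation equals it everywhere.
def stepB (seuraava : PySem.Dict Int Int) (p : Int × Int) : PySem.Dict Int Int :=
  (successors p.1).foldl (fun s t => s.insert t (s.getD t 0 + p.2)) seuraava

lemma succ_eq_parill (k : Int) (h0 : k ≠ 0) (he : (PySem.Int.toChars k).length % 2 = 0) :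
    successors k = parill_pituudesta k := by
  simp [successors, parill_pituudesta, h0, he]

lemma inner_eq (v : Int) :
    (fun (s : PySem.Dict Int Int) (t : Int) =>
        if s.contains t then s.insert t (s.getD t 0 + v) else s.insert t v)
      = (fun s t => s.insert t (s.getD t 0 + v)) := by
  funext s t
  by_cases h : s.contains t = true
  · simp [h]
  · simp only [Bool.not_eq_true] at h
    rw [if_neg (by simp [h]), PySem.Dict.getD_of_not_contains s 0 h, zero_add]

lemma stepA_eq_of_ne (d : PySem.Dict Int Int) (seu : PySem.Dict Int Int) (p : Int × Int)
    (h0 : p.1 ≠ 0) (hv : d.getD p.1 0 = p.2) : stepA d seu p = stepB seu p := by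
  by_cases he : (PySem.Int.toChars p.1).length % 2 = 0
  · simp only [stepA, stepB, h0, if_false, he, if_true, succ_eq_parill p.1 h0 he, hv, inner_eq]
  · simp only [stepA, stepB, h0, if_false, he, successors, List.foldl, jamasta, hv]
    by_cases hc : seu.contains (p.1 * 2024) = true
    · simp [hc]
    · simp only [Bool.not_eq_true] at hc
      rw [if_neg (by simp [hc]), PySem.Dict.getD_of_not_contains seu 0 hc, zero_add]

-- B = the stepB fold: the staged computation (flatten, dedup, per-key sums) produces
-- exactly the items of the accumulated dict, on EVERY input.

lemma getD_accum (l : List (Int × Int)) (d : PySem.Dict Int Int) (k : Int) :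
    (l.foldl (fun d q => d.insert q.1 (d.getD q.1 0 + q.2)) d).getD k 0
      = d.getD k 0 + ((l.filter (fun q => q.1 == k)).map (·.2)).sum := by
  induction l generalizing d with
  | nil => simp
  | cons q l ih =>
    rw [List.foldl_cons, ih, PySem.Dict.getD_insert]
    by_cases h : k = q.1
    · simp [h]; ring
    · have h2 : ¬ (q.1 = k) := fun e => h e.symm
      simp [h, h2]

lemma alt_eq_foldl_stepB (kivet : List (Int × Int)) :
    kierros_alt kivet = (kivet.foldl stepB PySem.Dict.empty).items := by
  set pairs := kivet.flatMap (fun p => (successors p.1).map (fun s => (s, p.2))) with hpairs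
  have halt : kierros_alt kivet
      = (pairs.foldl (fun o q => PySem.Set.add o q.1) PySem.Set.empty).map
          (fun s => (s, ((pairs.filter (fun q => q.1 == s)).map (·.2)).sum)) := rfl
  rw [halt]
  have hfold : kivet.foldl stepB PySem.Dict.empty
      = pairs.foldl (fun d q => d.insert q.1 (d.getD q.1 0 + q.2)) PySem.Dict.empty := by
    rw [hpairs, List.foldl_flatMap]
    apply PySem.List.foldl_congr_mem
    intro d p _
    rw [List.foldl_map]
    rfl
  set acc := pairs.foldl (fun d q => d.insert q.1 (d.getD q.1 0 + q.2)) PySem.Dict.empty with hacc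
  have hnd : acc.keys.Nodup := by
    rw [hacc]
    exact PySem.Dict.nodup_keys_foldl_insert_key pairs Prod.fst _ _ PySem.Dict.nodup_keys_empty
  have hkeys : acc.keys = pairs.foldl (fun o q => PySem.Set.add o q.1) PySem.Set.empty := by
    rw [hacc, PySem.Dict.keys_foldl_insert_key, PySem.Dict.keys_empty,
      PySem.Set.update_map_eq_foldl_add]
    rfl
  rw [hfold, PySem.Dict.items_eq_map_keys acc hnd 0, hkeys]
  apply List.map_congr_left
  intro s _
  congr 1
  rw [hacc, getD_accum, PySem.Dict.getD_empty, zero_add]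

def contrib (p : Int × Int) : Int := ((successors p.1).count 1 : Int) * p.2

lemma contrib_eq_ones (p : Int × Int) (h : p.1 ≠ 0) : contrib p = ones p := by
  by_cases he : (PySem.Int.toChars p.1).length % 2 = 0
  · simp [contrib, ones, succ_eq_parill p.1 h he, he]
  · have hne : ¬ (p.1 * 2024 = 1) := by omega
    simp [contrib, ones, successors, h, he, hne]

lemma getD1_inner (ts : List Int) (s : PySem.Dict Int Int) (v : Int) :
    (ts.foldl (fun s t => s.insert t (s.getD t 0 + v)) s).getD 1 0
      = s.getD 1 0 + (ts.count 1 : Int) * v := by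
  induction ts generalizing s with
  | nil => simp
  | cons t ts ih =>
    rw [List.foldl_cons, ih, PySem.Dict.getD_insert]
    by_cases h1 : (1 : Int) = t
    · simp [← h1]; ring
    · have h2 : ¬ t = 1 := fun h => h1 h.symm
      simp [h1, h2]

lemma getD1_stepB (l : List (Int × Int)) (s : PySem.Dict Int Int) :
    (l.foldl stepB s).getD 1 0 = s.getD 1 0 + (l.map contrib).sum := by
  induction l generalizing s with
  | nil => simp
  | cons p l ih =>
    rw [List.foldl_cons, ih, stepB, getD1_inner, List.map_cons, List.sum_cons, contrib]
    ring

lemma foldl_eq_on_nozero (d : PySem.Dict Int Int) (l : List (Int × Int))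
    (s : PySem.Dict Int Int) (hv : ∀ p ∈ l, d.getD p.1 0 = p.2)
    (h0 : ∀ p ∈ l, p.1 ≠ 0) : l.foldl (stepA d) s = l.foldl stepB s := by
  induction l generalizing s with
  | nil => rfl
  | cons p l ih =>
    rw [List.foldl_cons, List.foldl_cons,
      stepA_eq_of_ne d s p (h0 p (List.mem_cons_self ..)) (hv p (List.mem_cons_self ..))]
    exact ih _ (fun q hq => hv q (List.mem_cons_of_mem _ hq))
      (fun q hq => h0 q (List.mem_cons_of_mem _ hq))

lemma split_at_zero (kivet : List (Int × Int)) (h : (0 : Int) ∈ kivet.map Prod.fst) :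
    ∃ c post, kivet = kivet.takeWhile (·.1 != 0) ++ (0, c) :: post := by
  have hsplit := (List.takeWhile_append_dropWhile (p := fun p => p.1 != 0) (l := kivet)).symm
  cases hd : kivet.dropWhile (·.1 != 0) with
  | nil =>
    exfalso
    obtain ⟨p, hp, hp0⟩ := List.mem_map.mp h
    have : p ∈ kivet.takeWhile (·.1 != 0) := by
      rw [hsplit, hd, List.append_nil] at hp; exact hp
    have := List.mem_takeWhile_imp this
    simp [hp0] at this
  | cons q post =>
    have hq : ((fun p : Int × Int => p.1 != 0) q) = false := by
      have := List.head_dropWhile_not (fun p : Int × Int => p.1 != 0) (l := kivet) (by simp [hd])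
      simpa [hd] using this
    obtain ⟨k, v⟩ := q
    have hq0 : k = 0 := by simpa using hq
    subst hq0
    rw [hd] at hsplit
    exact ⟨v, post, hsplit⟩

lemma kierros_eq_foldl (kivet : List (Int × Int)) :
    kierros kivet = (kivet.foldl (stepA (PySem.Dict.mk kivet)) PySem.Dict.empty).items := rfl

-- the shared anatomy of both final theorems, with Pre_ unfolded
lemma main_anatomy (kivet : List (Int × Int)) (hnd : (kivet.map Prod.fst).Nodup)
    (h0 : (0 : Int) ∈ kivet.map Prod.fst) :
    ∃ (s₁ : PySem.Dict Int Int) (c : Int) (post : List (Int × Int)),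
      kierros kivet = (post.foldl stepB (s₁.insert 1 c)).items ∧
      kierros_alt kivet = (post.foldl stepB (s₁.insert 1
        (((kivet.takeWhile (·.1 != 0)).map ones).sum + c))).items := by
  obtain ⟨c, post, hsplit⟩ := split_at_zero kivet h0
  set pre := kivet.takeWhile (·.1 != 0) with hpre
  have hpre0 : ∀ p ∈ pre, p.1 ≠ 0 := by
    intro p hp
    have := List.mem_takeWhile_imp hp
    simpa using this
  have hpost0 : ∀ p ∈ post, p.1 ≠ 0 := by
    intro p hp hc
    rw [hsplit] at hnd
    simp only [List.map_append, List.map_cons] at hnd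
    have := (List.nodup_append.mp hnd).2.1
    rw [List.nodup_cons] at this
    exact this.1 (List.mem_map.mpr ⟨p, hp, hc⟩)
  have hkeys : (PySem.Dict.mk kivet).keys.Nodup := by rw [PySem.Dict.keys_mk]; exact hnd
  have hv : ∀ p ∈ kivet, (PySem.Dict.mk kivet).getD p.1 0 = p.2 := fun p hp =>
    PySem.Dict.getD_of_mem_items (PySem.Dict.mk kivet)
      (show (p.1, p.2) ∈ kivet from Prod.mk.eta ▸ hp) hkeys 0
  set d := PySem.Dict.mk kivet with hd
  set s₁ : PySem.Dict Int Int := pre.foldl stepB PySem.Dict.empty with hs₁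
  have hpreAB : pre.foldl (stepA d) PySem.Dict.empty = s₁ :=
    foldl_eq_on_nozero d pre _
      (fun p hp => hv p (hsplit ▸ List.mem_append_left _ hp)) hpre0
  have hc0 : d.getD 0 0 = c := hv (0, c) (hsplit ▸ List.mem_append_right _ (List.mem_cons_self ..))
  have hg : s₁.getD 1 0 = (pre.map ones).sum := by
    rw [hs₁, getD1_stepB, PySem.Dict.getD_empty, zero_add]
    congr 1
    exact List.map_congr_left (fun p hp => contrib_eq_ones p (hpre0 p hp))
  refine ⟨s₁, c, post, ?_, ?_⟩
  · have h1 : kivet.foldl (stepA d) PySem.Dict.empty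
        = post.foldl (stepA d) (stepA d (pre.foldl (stepA d) PySem.Dict.empty) (0, c)) := by
      conv_lhs => rw [hsplit]
      rw [List.foldl_append, List.foldl_cons]
    have hstep : stepA d s₁ (0, c) = s₁.insert 1 c := by simp [stepA, hc0]
    rw [kierros_eq_foldl kivet, ← hd, h1, hpreAB, hstep,
      foldl_eq_on_nozero d post _
        (fun p hp => hv p (hsplit ▸ List.mem_append_right _ (List.mem_cons_of_mem _ hp))) hpost0]
  · have h1 : kivet.foldl stepB PySem.Dict.empty
        = post.foldl stepB (stepB (pre.foldl stepB PySem.Dict.empty) (0, c)) := by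
      conv_lhs => rw [hsplit]
      rw [List.foldl_append, List.foldl_cons]
    have hstep : stepB s₁ (0, c) = s₁.insert 1 ((pre.map ones).sum + c) := by
      simp [stepB, successors, hg]
    rw [alt_eq_foldl_stepB kivet, h1, ← hs₁, hstep]

-- ===== VERDICT (by name: the statement is the Claim_ definition above) =====
theorem kierros_spec : Claim_unchanged_kierros := by
  intro kivet _ hpre
  obtain ⟨hnd, -⟩ := hpre
  intro hD
  by_cases h0 : (0 : Int) ∈ kivet.map Prod.fst
  · have hS : ((kivet.takeWhile (·.1 != 0)).map ones).sum = 0 := by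
      by_contra hS
      exact hD ⟨h0, hS⟩
    obtain ⟨s₁, c, post, hA, hB⟩ := main_anatomy kivet hnd h0
    rw [hA, hB, hS, zero_add]
  · have hkeys : (PySem.Dict.mk kivet).keys.Nodup := by rw [PySem.Dict.keys_mk]; exact hnd
    rw [kierros_eq_foldl, alt_eq_foldl_stepB,
      foldl_eq_on_nozero (PySem.Dict.mk kivet) kivet _
        (fun p hp => PySem.Dict.getD_of_mem_items (PySem.Dict.mk kivet)
          (show (p.1, p.2) ∈ kivet from Prod.mk.eta ▸ hp) hkeys 0)
        (fun p hp hc => h0 (List.mem_map.mpr ⟨p, hp, hc⟩))]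

theorem kierros_changed : Claim_changed_kierros := by unfold Claim_changed_kierros; decide

theorem kierros_tight : Claim_exact_kierros := by
  intro kivet _ hpre hD heq
  obtain ⟨hnd, -⟩ := hpre
  obtain ⟨h0, hS⟩ := hD
  obtain ⟨s₁, c, post, hA, hB⟩ := main_anatomy kivet hnd h0
  rw [hA, hB] at heq
  have hdicts := PySem.Dict.ext heq
  have hval : (post.foldl stepB (s₁.insert 1 c)).getD 1 0
      = (post.foldl stepB (s₁.insert 1
          (((kivet.takeWhile (·.1 != 0)).map ones).sum + c))).getD 1 0 := by rw [hdicts]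
  rw [getD1_stepB, getD1_stepB, PySem.Dict.getD_insert_self,
    PySem.Dict.getD_insert_self] at hval
  omega
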